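-- pv_equiv track=rewrite | github.com/THU-KEG/OmniEvent | OpenEE/evaluation/dump_result.py | get_sentence_arguments
-- ===== SOURCE A (Python) =====
-- def get_sentence_arguments(input_sentence):
--     input_sentence.append({"role": "NA", "word": "<EOS>"})
--     arguments = []
--
--     previous_role = None
--     previous_arg = ""
--     for item in input_sentence:
--         if item["role"] != "NA" and previous_role is None:
--             previous_role = item["role"]
--             previous_arg = item["word"]
--
--         elif item["role"] == previous_role:
--             previous_arg += item["word"]
--
--         elif item["role"] != "NA":
--             arguments.append({"role": previous_role, "argument": previous_arg})
--             previous_role = item["role"]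
--             previous_arg = item["word"]
--
--         elif previous_role is not None:
--             arguments.append({"role": previous_role, "argument": previous_arg})
--             previous_role = None
--             previous_arg = ""
--
--     return arguments
-- ===== SOURCE B (Python) =====
-- def get_sentence_arguments(input_sentence):
--     # Same in-place side effect as the original: append the EOS sentinel.
--     input_sentence.append({"role": "NA", "word": "<EOS>"})
--     arguments = []
--     i, n = 0, len(input_sentence)
--     while i < n:
--         role = input_sentence[i]["role"]
--         j = i
--         while j < n and input_sentence[j]["role"] == role:
--             j += 1
--         if role != "NA":
--             arguments.append({"role": role,
--                               "argument": "".join(it["word"] for it in input_sentence[i:j])})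
--         i = j
--     return arguments
-- ===== Notes on version B (the rewrite author's own statement) =====
-- stated objective: alternative
-- what changed: Replaced the per-token previous_role/previous_arg state machine with run detection: an index scan finds each maximal run of equal roles and emits one argument per non-NA run.
import Mathlib
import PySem

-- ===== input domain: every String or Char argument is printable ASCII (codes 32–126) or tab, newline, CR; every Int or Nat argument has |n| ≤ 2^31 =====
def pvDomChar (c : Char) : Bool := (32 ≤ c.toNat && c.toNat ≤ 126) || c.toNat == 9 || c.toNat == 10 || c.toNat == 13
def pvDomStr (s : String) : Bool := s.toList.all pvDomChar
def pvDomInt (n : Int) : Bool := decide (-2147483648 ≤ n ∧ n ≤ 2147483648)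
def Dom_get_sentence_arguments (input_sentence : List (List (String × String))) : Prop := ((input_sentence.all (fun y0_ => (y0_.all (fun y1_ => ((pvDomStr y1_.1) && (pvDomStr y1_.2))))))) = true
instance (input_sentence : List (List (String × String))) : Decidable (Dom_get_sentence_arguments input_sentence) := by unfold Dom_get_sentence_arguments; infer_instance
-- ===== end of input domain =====

-- B replaces A's previous_role/previous_arg state machine by scanning each maximal run of
-- equal roles and emitting one argument per non-NA run; the Python A mutates its argument
-- (appends the EOS dict) and B performs the same mutation — the theorems are about the return value.

-- item["role"] / item["word"] on a dict (first-match association-list lookup); the .getD ""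
-- default is never reached under Pre_ (missing keys are a Python KeyError, excluded there).
def pvRole (item : List (String × String)) : String :=
  ((PySem.Dict.mk item).get? "role").getD ""

def pvWord (item : List (String × String)) : String :=
  ((PySem.Dict.mk item).get? "word").getD ""

def pvEOS : List (String × String) := [("role", "NA"), ("word", "<EOS>")]

-- ===== PORT A =====
-- the for-loop of A, state = (arguments, previous_role, previous_arg); branches in A's order
def pvLoopA (acc : List (List (String × String))) (prevRole : Option String)
    (prevArg : String) : List (List (String × String)) → List (List (String × String))
  | [] => acc
  | item :: rest =>
    if pvRole item ≠ "NA" ∧ prevRole = none then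
      pvLoopA acc (some (pvRole item)) (pvWord item) rest
    else if prevRole = some (pvRole item) then
      pvLoopA acc prevRole (prevArg ++ pvWord item) rest
    else if pvRole item ≠ "NA" then
      pvLoopA (acc ++ [[("role", prevRole.getD ""), ("argument", prevArg)]])
        (some (pvRole item)) (pvWord item) rest
    else if prevRole ≠ none then
      pvLoopA (acc ++ [[("role", prevRole.getD ""), ("argument", prevArg)]]) none "" rest
    else
      pvLoopA acc prevRole prevArg rest

def get_sentence_arguments (input_sentence : List (List (String × String))) :
    List (List (String × String)) :=
  pvLoopA [] none "" (input_sentence ++ [pvEOS])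

-- ===== PORT B =====
-- the outer while-loop of B: head of the list starts a run, the inner scan (takeWhile /
-- dropWhile on the same predicate) finds its end, one argument is emitted per non-NA run
def pvLoopB : List (List (String × String)) → List (List (String × String))
  | [] => []
  | item :: rest =>
    let r := pvRole item
    let run := item :: rest.takeWhile (fun y => pvRole y == r)
    (if r ≠ "NA" then
      [[("role", r), ("argument", PySem.Str.join "" (run.map pvWord))]]
    else []) ++ pvLoopB (rest.dropWhile (fun y => pvRole y == r))
  termination_by l => l.length
  decreasing_by
    simp only [List.length_cons]
    exact Nat.lt_succ_of_le (List.length_dropWhile_le _ _)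

def get_sentence_arguments_alt (input_sentence : List (List (String × String))) :
    List (List (String × String)) :=
  pvLoopB (input_sentence ++ [pvEOS])

-- ===== PRECONDITION & SPEC =====
-- Pre_ excludes exactly the Python KeyErrors: every item must carry a "role" key, and items
-- whose role is not "NA" must also carry a "word" key (A never reads "word" of an NA item).
def Pre_get_sentence_arguments (input_sentence : List (List (String × String))) : Prop :=
  ∀ item ∈ input_sentence,
    ((PySem.Dict.mk item).get? "role").isSome = true ∧
    (pvRole item ≠ "NA" → ((PySem.Dict.mk item).get? "word").isSome = true)

instance (input_sentence : List (List (String × String))) :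
    Decidable (Pre_get_sentence_arguments input_sentence) := by
  unfold Pre_get_sentence_arguments; infer_instance

def pvWitness_get_sentence_arguments : (List (List (String × String))) :=
  [[("role", "agent"), ("word", "Bob")], [("role", "NA"), ("word", "ate")],
   [("role", "food"), ("word", "rice")]]

def Spec_get_sentence_arguments (input_sentence : List (List (String × String))) (out : List (List (String × String))) : Prop := out = get_sentence_arguments_alt input_sentence
instance (input_sentence : List (List (String × String))) (out : List (List (String × String))) : Decidable (Spec_get_sentence_arguments input_sentence out) := by unfold Spec_get_sentence_arguments; infer_instance

-- ===== CLAIM (what is proved, stated in full; the proofs are below) =====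
def Claim_equal_get_sentence_arguments : Prop := ∀ (input_sentence : List (List (String × String))), Dom_get_sentence_arguments input_sentence → Pre_get_sentence_arguments input_sentence → Spec_get_sentence_arguments input_sentence (get_sentence_arguments input_sentence)

-- ===== LEMMAS AND PROOFS =====

theorem pvJoin_nil : PySem.Str.join "" ([] : List String) = "" := by
  simp [PySem.Str.join, PySem.Chars.join, List.intercalate]

theorem pvJoin_cons (a : String) (l : List String) :
    PySem.Str.join "" (a :: l) = a ++ PySem.Str.join "" l := by
  have h : PySem.Chars.join [] (a.toList :: l.map String.toList) =
      a.toList ++ PySem.Chars.join [] (l.map String.toList) := by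
    simp only [PySem.Chars.join]
    cases l <;> simp [List.intercalate]
  simp [PySem.Str.join, h, String.ofList_append, String.ofList_toList]

-- `l ends with an item of role "NA"` — true of l ++ [EOS], the list both loops run on
def pvEndsNA (l : List (List (String × String))) : Prop :=
  ∃ x, l.getLast? = some x ∧ pvRole x = "NA"

theorem pvLoopB_dropNA (l : List (List (String × String))) :
    pvLoopB (l.dropWhile (fun y => pvRole y == "NA")) = pvLoopB l := by
  match l with
  | [] => rfl
  | y :: ys =>
    by_cases h : pvRole y = "NA"
    · rw [List.dropWhile_cons_of_pos (by simp [h])]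
      rw [pvLoopB]
      simp [h]
    · rw [List.dropWhile_cons_of_neg (by simp [h])]

theorem pvMain (l : List (List (String × String))) :
    (pvEndsNA l → ∀ acc, pvLoopA acc none "" l = acc ++ pvLoopB l) ∧
    (pvEndsNA l → ∀ acc r s, r ≠ "NA" →
      pvLoopA acc (some r) s l =
        acc ++ [("role", r),
                ("argument", s ++ PySem.Str.join "" ((l.takeWhile (fun y => pvRole y == r)).map pvWord))] ::
          pvLoopB (l.dropWhile (fun y => pvRole y == r))) := by
  induction l with
  | nil =>
    constructor
    · rintro ⟨x, hx, -⟩ _; simp at hx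
    · rintro ⟨x, hx, -⟩ _ _ _ _; simp at hx
  | cons x xs ih =>
    have hlast : xs ≠ [] → pvEndsNA (x :: xs) → pvEndsNA xs := by
      rintro hne ⟨z, hz, hzr⟩
      refine ⟨z, ?_, hzr⟩
      rcases xs with _ | ⟨y, ys⟩
      · simp at hne
      · rwa [List.getLast?_cons_cons] at hz
    constructor
    · -- prevRole = none
      rintro hE acc
      by_cases h : pvRole x = "NA"
      · -- skip: branch 5 (role is NA, nothing pending)
        rw [pvLoopA, if_neg (by simp [h]), if_neg (by simp), if_neg (by simp [h]),
          if_neg (by simp)]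
        have hB : pvLoopB (x :: xs) = pvLoopB (xs.dropWhile (fun y => pvRole y == "NA")) := by
          rw [pvLoopB]; simp [h]
        rcases xs with _ | ⟨y, ys⟩
        · simp [pvLoopA, hB, pvLoopB]
        · rw [(ih.1 (hlast (by simp) hE)) acc, hB, pvLoopB_dropNA (y :: ys)]
      · -- start a run: branch 1
        rw [pvLoopA, if_pos ⟨h, rfl⟩]
        have hxs : xs ≠ [] := by
          rcases hE with ⟨z, hz, hzr⟩
          rintro rfl
          simp at hz; subst hz; exact h hzr
        rw [(ih.2 (hlast hxs hE)) acc (pvRole x) (pvWord x) h]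
        rw [pvLoopB]
        simp [h, pvJoin_cons]
    · -- prevRole = some r
      rintro hE acc r s hr
      by_cases h : pvRole x = r
      · -- continue the run: branch 2
        rw [pvLoopA, if_neg (by simp), if_pos (by simp [h])]
        have hxs : xs ≠ [] := by
          rcases hE with ⟨z, hz, hzr⟩
          rintro rfl
          simp at hz; subst hz; rw [h] at hzr; exact hr hzr
        rw [(ih.2 (hlast hxs hE)) acc r (s ++ pvWord x) hr]
        rw [List.takeWhile_cons_of_pos (by simp [h]), List.dropWhile_cons_of_pos (by simp [h])]
        simp [pvJoin_cons, String.append_assoc]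
      · by_cases hNA : pvRole x = "NA"
        · -- close the run at an NA item: branch 4
          rw [pvLoopA, if_neg (by simp [hNA]), if_neg (by simp [Ne.symm h]),
            if_neg (by simp [hNA]), if_pos (by simp)]
          rw [List.takeWhile_cons_of_neg (by simp [h]), List.dropWhile_cons_of_neg (by simp [h])]
          have hB : pvLoopB (x :: xs) = pvLoopB (xs.dropWhile (fun y => pvRole y == "NA")) := by
            rw [pvLoopB]; simp [hNA]
          rcases xs with _ | ⟨y, ys⟩
          · simp [pvLoopA, hB, pvLoopB, pvJoin_nil, String.append_empty]
          · rw [(ih.1 (hlast (by simp) hE)) (acc ++ [[("role", (some r).getD ""), ("argument", s)]]),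
              hB, pvLoopB_dropNA (y :: ys)]
            simp [pvJoin_nil, String.append_empty]
        · -- close the run, a new one starts: branch 3
          rw [pvLoopA, if_neg (by simp), if_neg (by simp [Ne.symm h]), if_pos hNA]
          have hxs : xs ≠ [] := by
            rcases hE with ⟨z, hz, hzr⟩
            rintro rfl
            simp at hz; subst hz; exact hNA hzr
          rw [(ih.2 (hlast hxs hE)) (acc ++ [[("role", (some r).getD ""), ("argument", s)]])
            (pvRole x) (pvWord x) hNA]
          rw [List.takeWhile_cons_of_neg (by simp [h]), List.dropWhile_cons_of_neg (by simp [h])]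
          rw [pvLoopB]
          simp [hNA, pvJoin_cons, pvJoin_nil, String.append_empty]

-- ===== VERDICT (by name: the statement is the Claim_ definition above) =====
theorem get_sentence_arguments_spec : Claim_equal_get_sentence_arguments := by
  intro l _ _
  unfold Spec_get_sentence_arguments get_sentence_arguments get_sentence_arguments_alt
  have hE : pvEndsNA (l ++ [pvEOS]) := ⟨pvEOS, by simp, by decide⟩
  simpa using (pvMain (l ++ [pvEOS])).1 hE []
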